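-- pv_equiv track=rewrite | github.com/itsbillw/advent_of_code_2024 | day_08/day_08.py | calculate_antinodes_with_harmonics
-- ===== SOURCE A (Python) =====
-- def calculate_antinodes_with_harmonics(antennas_by_freq, rows, cols):
--     """Calculate all antinode positions considering resonant harmonics."""
--     antinodes = set()
--     for freq, positions in antennas_by_freq.items():
--         # If only one antenna of this frequency, no additional antinodes
--         if len(positions) < 2:
--             continue
--
--         # Add all antenna positions of this frequency as antinodes
--         antinodes.update(positions)
--
--         # Check for aligned antinodes
--         for i, (x1, y1) in enumerate(positions):
--             for j, (x2, y2) in enumerate(positions):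
--                 if i >= j:  # Avoid redundant comparisons
--                     continue
--
--                 # Check if aligned
--                 dx, dy = x2 - x1, y2 - y1
--                 gcd = (
--                     abs(dx)
--                     if dy == 0
--                     else abs(dy)
--                     if dx == 0
--                     else abs(gcd_recursive(dx, dy))
--                 )
--                 dx, dy = dx // gcd, dy // gcd  # Normalize direction vector
--
--                 # Extend in both directions to find antinodes
--                 nx, ny = x1, y1
--                 while 0 <= nx < rows and 0 <= ny < cols:
--                     antinodes.add((nx, ny))
--                     nx -= dx
--                     ny -= dy
--                 nx, ny = x2, y2
--                 while 0 <= nx < rows and 0 <= ny < cols: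
--                     antinodes.add((nx, ny))
--                     nx += dx
--                     ny += dy
--
--     return antinodes
--
-- def gcd_recursive(a, b):
--     """Calculate GCD using Euclidean algorithm."""
--     while b:
--         a, b = b, a % b
--     return a
-- ===== SOURCE B (Python) =====
-- def _limit(p, d, n):
--     """Largest t >= 0 with 0 <= p + t*d < n (given 0 <= p < n), or None if every t works."""
--     if d > 0:
--         return (n - 1 - p) // d
--     if d < 0:
--         return p // -d
--     return None
--
--
-- def _ray(x, y, dx, dy, rows, cols):
--     """The in-grid points (x + t*dx, y + t*dy), t = 0, 1, ..., computed in closed form."""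
--     if not (0 <= x < rows and 0 <= y < cols):
--         return []
--     tx = _limit(x, dx, rows)
--     ty = _limit(y, dy, cols)
--     last = ty if tx is None else tx if ty is None else min(tx, ty)
--     return [(x + t * dx, y + t * dy) for t in range(last + 1)]
--
--
-- def _gcd(a, b):
--     return a if b == 0 else _gcd(b, a % b)
--
--
-- def calculate_antinodes_with_harmonics(antennas_by_freq, rows, cols):
--     antinodes = set()
--     for positions in antennas_by_freq.values():
--         if len(positions) < 2:
--             continue
--         antinodes.update(positions)
--         for i in range(len(positions) - 1):
--             x1, y1 = positions[i]
--             for x2, y2 in positions[i + 1:]: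
--                 g = _gcd(abs(x2 - x1), abs(y2 - y1))
--                 dx, dy = (x2 - x1) // g, (y2 - y1) // g
--                 antinodes.update(_ray(x1, y1, -dx, -dy, rows, cols))
--                 antinodes.update(_ray(x2, y2, dx, dy, rows, cols))
--     return antinodes
-- ===== Notes on version B (the rewrite author's own statement) =====
-- stated objective: alternative
-- what changed: B replaces A's per-pair while-loop walks with a closed-form ray: the number of in-grid steps is computed by floor division and the ray is emitted as a list comprehension over range, and A's three-way-branched gcd (with a hand-written Euclid loop) becomes a single recursive Euclid on absolute values; the pair iteration uses index/suffix slicing instead of double enumerate with an i>=j skip.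
-- outside the precondition, e.g. on calculate_antinodes_with_harmonics({'a': [(1, 1), (1, 1)]}, 3, 3): A raises ZeroDivisionError, B raises ZeroDivisionError
import Mathlib
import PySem

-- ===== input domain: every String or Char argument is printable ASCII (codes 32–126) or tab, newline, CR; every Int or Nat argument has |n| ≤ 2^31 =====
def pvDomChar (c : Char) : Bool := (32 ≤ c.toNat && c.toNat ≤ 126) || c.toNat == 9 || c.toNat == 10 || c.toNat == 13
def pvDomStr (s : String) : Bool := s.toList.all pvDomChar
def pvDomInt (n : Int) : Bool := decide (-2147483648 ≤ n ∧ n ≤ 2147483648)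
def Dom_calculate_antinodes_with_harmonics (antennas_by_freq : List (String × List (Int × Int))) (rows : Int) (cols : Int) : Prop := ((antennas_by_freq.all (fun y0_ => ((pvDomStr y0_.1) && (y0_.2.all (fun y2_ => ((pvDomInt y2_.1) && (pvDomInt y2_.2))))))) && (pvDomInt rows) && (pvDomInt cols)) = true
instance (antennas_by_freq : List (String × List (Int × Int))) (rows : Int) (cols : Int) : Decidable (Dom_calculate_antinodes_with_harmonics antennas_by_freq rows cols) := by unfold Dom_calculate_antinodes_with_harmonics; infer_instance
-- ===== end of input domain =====

-- B replaces A's per-pair while-loop walks by a closed-form ray (extent computed by floor division)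
-- and A's three-way-branched gcd by one Euclidean gcd on absolute values; same cost, different algorithmic core.
-- Equivalence is proved on inputs whose position lists have no duplicate points (on a duplicate both
-- programs raise ZeroDivisionError).

-- ===== PORT A =====
-- while b: a, b = b, a % b; return a   (Python % = sign of divisor)
def gcd_recursive (a b : Int) : Int :=
  if h : b = 0 then a
  else gcd_recursive b (PySem.Int.mod a b)
termination_by b.natAbs
decreasing_by
  rcases lt_or_gt_of_ne h with hb | hb
  · have h1 := PySem.Int.mod_neg_bounds a hb
    omega
  · have h1 := PySem.Int.mod_nonneg a hb
    have h2 := PySem.Int.mod_lt a hb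
    omega

-- the two 'while 0 <= nx < rows and 0 <= ny < cols' loops of A, with fuel making them total;
-- fuel rows.toNat + cols.toNat + 1 is proved sufficient for the normalized nonzero step under Pre_.
def pvWalkA (rows cols dx dy : Int) : Nat → Int → Int → PySem.Set (Int × Int) → PySem.Set (Int × Int)
  | 0, _, _, s => s
  | f + 1, nx, ny, s =>
    if 0 ≤ nx ∧ nx < rows ∧ 0 ≤ ny ∧ ny < cols then
      pvWalkA rows cols dx dy f (nx + dx) (ny + dy) (PySem.Set.add s (nx, ny))
    else s

def calculate_antinodes_with_harmonics (antennas_by_freq : List (String × List (Int × Int))) (rows : Int) (cols : Int) : List (Int × Int) :=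
  antennas_by_freq.foldl (fun antinodes fp =>
    let positions := fp.2
    if positions.length < 2 then antinodes
    else
      let antinodes := PySem.Set.update antinodes positions
      (PySem.List.enumerate positions).foldl (fun antinodes ip =>
        (PySem.List.enumerate positions).foldl (fun antinodes jp =>
          if ip.1 ≥ jp.1 then antinodes
          else
            let dx := jp.2.1 - ip.2.1
            let dy := jp.2.2 - ip.2.2
            let g : Int := if dy = 0 then |dx| else if dx = 0 then |dy| else |gcd_recursive dx dy|
            let dx := PySem.Int.floordiv dx g
            let dy := PySem.Int.floordiv dy g
            let antinodes := pvWalkA rows cols (-dx) (-dy) (rows.toNat + cols.toNat + 1) ip.2.1 ip.2.2 antinodes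
            pvWalkA rows cols dx dy (rows.toNat + cols.toNat + 1) jp.2.1 jp.2.2 antinodes)
          antinodes)
        antinodes) []

-- ===== PORT B =====
-- _gcd(a, b) = a if b == 0 else _gcd(b, a % b)  (only called on nonnegative ints)
def pvGcdB (a b : Nat) : Nat :=
  if h : b = 0 then a else pvGcdB b (a % b)
termination_by b
decreasing_by exact Nat.mod_lt _ (by omega)

-- _limit(p, d, n)
def pvLimit (p d n : Int) : Option Int :=
  if 0 < d then some (PySem.Int.floordiv (n - 1 - p) d)
  else if d < 0 then some (PySem.Int.floordiv p (-d))
  else none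

-- _ray(x, y, dx, dy, rows, cols)
def pvRay (x y dx dy rows cols : Int) : List (Int × Int) :=
  if 0 ≤ x ∧ x < rows ∧ 0 ≤ y ∧ y < cols then
    let last : Int :=
      match pvLimit x dx rows, pvLimit y dy cols with
      | none, none => 0          -- Python raises TypeError here (dx = dy = 0); unreachable under Pre_
      | none, some t => t
      | some t, none => t
      | some t1, some t2 => min t1 t2
    (PySem.List.pyRange 0 (last + 1) 1).map (fun t => (x + t * dx, y + t * dy))
  else []

def calculate_antinodes_with_harmonics_alt (antennas_by_freq : List (String × List (Int × Int))) (rows : Int) (cols : Int) : List (Int × Int) :=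
  antennas_by_freq.foldl (fun antinodes fp =>
    let positions := fp.2
    if positions.length < 2 then antinodes
    else
      let antinodes := PySem.Set.update antinodes positions
      (PySem.List.pyRange 0 ((positions.length : Int) - 1) 1).foldl (fun antinodes i =>
        let p := PySem.List.pyGetD positions i (0, 0)
        (PySem.List.slice positions (some (i + 1)) none).foldl (fun antinodes q =>
          let g : Int := (pvGcdB (q.1 - p.1).natAbs (q.2 - p.2).natAbs : Nat)
          let dx := PySem.Int.floordiv (q.1 - p.1) g
          let dy := PySem.Int.floordiv (q.2 - p.2) g
          PySem.Set.update
            (PySem.Set.update antinodes (pvRay p.1 p.2 (-dx) (-dy) rows cols))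
            (pvRay q.1 q.2 dx dy rows cols))
          antinodes)
        antinodes) []

-- ===== PRECONDITION & SPEC =====
-- Pre_ excludes inputs where some frequency's position list repeats a point: there A (and B)
-- raises ZeroDivisionError while normalizing the all-zero direction vector.
def Pre_calculate_antinodes_with_harmonics (antennas_by_freq : List (String × List (Int × Int))) (rows : Int) (cols : Int) : Prop :=
  ∀ fp ∈ antennas_by_freq, fp.2.Nodup
instance (antennas_by_freq : List (String × List (Int × Int))) (rows : Int) (cols : Int) : Decidable (Pre_calculate_antinodes_with_harmonics antennas_by_freq rows cols) := by unfold Pre_calculate_antinodes_with_harmonics; infer_instance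

def pvWitness_calculate_antinodes_with_harmonics : (List (String × List (Int × Int))) × Int × Int :=
  ([("a", [(0, 0), (1, 1)])], 3, 3)

def Spec_calculate_antinodes_with_harmonics (antennas_by_freq : List (String × List (Int × Int))) (rows : Int) (cols : Int) (out : List (Int × Int)) : Prop := out = calculate_antinodes_with_harmonics_alt antennas_by_freq rows cols
instance (antennas_by_freq : List (String × List (Int × Int))) (rows : Int) (cols : Int) (out : List (Int × Int)) : Decidable (Spec_calculate_antinodes_with_harmonics antennas_by_freq rows cols out) := by unfold Spec_calculate_antinodes_with_harmonics; infer_instance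

-- ===== CLAIM (what is proved, stated in full; the proofs are below) =====
def Claim_equal_calculate_antinodes_with_harmonics : Prop := ∀ (antennas_by_freq : List (String × List (Int × Int))) (rows : Int) (cols : Int), Dom_calculate_antinodes_with_harmonics antennas_by_freq rows cols → Pre_calculate_antinodes_with_harmonics antennas_by_freq rows cols → Spec_calculate_antinodes_with_harmonics antennas_by_freq rows cols (calculate_antinodes_with_harmonics antennas_by_freq rows cols)

-- ===== LEMMAS AND PROOFS =====

-- fold over the ordered pairs (earlier, later) of a list: the common shape of both pair loops
def foldPairs {α β : Type} (G : β → α → α → β) : List α → β → β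
  | [], a => a
  | x :: xs, a => foldPairs G xs (xs.foldl (fun a q => G a x q) a)

-- gcd facts ------------------------------------------------------------
theorem pvGcdB_eq_gcd (a b : Nat) : pvGcdB a b = Nat.gcd a b := by
  fun_induction pvGcdB a b with
  | case1 a => simp
  | case2 a b h ih =>
    rw [ih, Nat.gcd_comm b (a % b), ← Nat.gcd_rec, Nat.gcd_comm]

theorem gcd_recursive_natAbs (a b : Int) : (gcd_recursive a b).natAbs = Int.gcd a b := by
  fun_induction gcd_recursive a b with
  | case1 a => simp [Int.gcd]
  | case2 a b h ih =>
    rw [ih]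
    have hm : PySem.Int.mod a b = a - PySem.Int.floordiv a b * b := by
      have := PySem.Int.floordiv_mul_add_mod a b
      omega
    rw [hm, Int.gcd_sub_mul_right_right, Int.gcd_comm]

-- A's branched gcd expression = B's gcd on absolute values
theorem gcdA_eq_gcdB (dx dy : Int) :
    (if dy = 0 then |dx| else if dx = 0 then |dy| else |gcd_recursive dx dy|) = ((pvGcdB dx.natAbs dy.natAbs : Nat) : Int) := by
  rw [pvGcdB_eq_gcd]
  split_ifs with h1 h2
  · subst h1; rw [Int.abs_eq_natAbs]; simp
  · subst h2; rw [Int.abs_eq_natAbs]; simp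
  · rw [Int.abs_eq_natAbs, gcd_recursive_natAbs]; rfl

-- limit facts ----------------------------------------------------------
theorem pvLimit_eq_none_iff (p d n : Int) : pvLimit p d n = none ↔ d = 0 := by
  unfold pvLimit
  split_ifs with h1 h2 <;> simp <;> omega

theorem pvLimit_nonneg {p d n t : Int} (h0 : 0 ≤ p) (h1 : p < n) (h : pvLimit p d n = some t) : 0 ≤ t := by
  unfold pvLimit at h
  split_ifs at h with hd1 hd2 <;> simp only [Option.some.injEq] at h <;> subst h
  · rw [PySem.Int.le_floordiv_iff_mul_le hd1]; omega
  · rw [PySem.Int.le_floordiv_iff_mul_le (by omega : (0:Int) < -d)]; omega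

theorem pvLimit_le {p d n t : Int} (h0 : 0 ≤ p) (h1 : p < n) (h : pvLimit p d n = some t) : t ≤ n - 1 := by
  unfold pvLimit at h
  split_ifs at h with hd1 hd2 <;> simp only [Option.some.injEq] at h <;> subst h
  · have h2 : PySem.Int.floordiv (n - 1 - p) d < n := by
      rw [PySem.Int.floordiv_lt_iff_lt_mul hd1]
      nlinarith
    omega
  · have h2 : PySem.Int.floordiv p (-d) < n := by
      rw [PySem.Int.floordiv_lt_iff_lt_mul (by omega : (0:Int) < -d)]
      nlinarith
    omega

theorem pvLimit_step_iff {p d n t : Int} (h0 : 0 ≤ p) (h1 : p < n) (h : pvLimit p d n = some t) :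
    (0 ≤ p + d ∧ p + d < n) ↔ 1 ≤ t := by
  unfold pvLimit at h
  split_ifs at h with hd1 hd2 <;> simp only [Option.some.injEq] at h <;> subst h
  · rw [PySem.Int.le_floordiv_iff_mul_le hd1]; omega
  · rw [PySem.Int.le_floordiv_iff_mul_le (by omega : (0:Int) < -d)]; omega

theorem pvLimit_shift {p d n t : Int} (h : pvLimit p d n = some t) (ht : 1 ≤ t) :
    pvLimit (p + d) d n = some (t - 1) := by
  unfold pvLimit at h ⊢
  split_ifs at h with hd1 hd2 <;> simp only [Option.some.injEq] at h
  · rw [if_pos hd1, Option.some.injEq]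
    rw [PySem.Int.floordiv_eq_iff_of_pos hd1] at h ⊢
    constructor <;> nlinarith [h.1, h.2]
  · rw [if_neg hd1, if_pos hd2, Option.some.injEq]
    rw [PySem.Int.floordiv_eq_iff_of_pos (by omega : (0:Int) < -d)] at h ⊢
    constructor <;> nlinarith [h.1, h.2]

-- ray facts ------------------------------------------------------------
-- the combined extent of the two per-coordinate limits (names pvRay's inline match)
def comb : Option Int → Option Int → Int
  | none, none => 0
  | none, some t => t
  | some t, none => t
  | some t1, some t2 => min t1 t2

theorem pvRay_eq (x y dx dy rows cols : Int) :
    pvRay x y dx dy rows cols =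
      if 0 ≤ x ∧ x < rows ∧ 0 ≤ y ∧ y < cols then
        (PySem.List.pyRange 0 (comb (pvLimit x dx rows) (pvLimit y dy cols) + 1) 1).map
          (fun t => (x + t * dx, y + t * dy))
      else [] := by
  cases h1 : pvLimit x dx rows <;> cases h2 : pvLimit y dy cols <;> simp [pvRay, comb, h1, h2]

theorem comb_nonneg {x y dx dy rows cols : Int}
    (hx : 0 ≤ x ∧ x < rows) (hy : 0 ≤ y ∧ y < cols) :
    0 ≤ comb (pvLimit x dx rows) (pvLimit y dy cols) := by
  cases h1 : pvLimit x dx rows <;> cases h2 : pvLimit y dy cols <;> simp only [comb]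
  · omega
  · exact pvLimit_nonneg hy.1 hy.2 h2
  · exact pvLimit_nonneg hx.1 hx.2 h1
  · exact le_min (pvLimit_nonneg hx.1 hx.2 h1) (pvLimit_nonneg hy.1 hy.2 h2)

theorem comb_next_iff {x y dx dy rows cols : Int} (hd : ¬ (dx = 0 ∧ dy = 0))
    (hx : 0 ≤ x ∧ x < rows) (hy : 0 ≤ y ∧ y < cols) :
    (0 ≤ x + dx ∧ x + dx < rows ∧ 0 ≤ y + dy ∧ y + dy < cols) ↔
      1 ≤ comb (pvLimit x dx rows) (pvLimit y dy cols) := by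
  cases h1 : pvLimit x dx rows <;> cases h2 : pvLimit y dy cols <;> simp only [comb]
  · exact absurd ⟨(pvLimit_eq_none_iff _ _ _).1 h1, (pvLimit_eq_none_iff _ _ _).1 h2⟩ hd
  · have hdx := (pvLimit_eq_none_iff _ _ _).1 h1
    have := pvLimit_step_iff hy.1 hy.2 h2
    subst hdx; omega
  · have hdy := (pvLimit_eq_none_iff _ _ _).1 h2
    have := pvLimit_step_iff hx.1 hx.2 h1
    subst hdy; omega
  · have i1 := pvLimit_step_iff hx.1 hx.2 h1
    have i2 := pvLimit_step_iff hy.1 hy.2 h2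
    rw [le_min_iff]; omega

theorem comb_shift {x y dx dy rows cols : Int}
    (hx : 0 ≤ x ∧ x < rows) (hy : 0 ≤ y ∧ y < cols)
    (h1 : 1 ≤ comb (pvLimit x dx rows) (pvLimit y dy cols)) :
    comb (pvLimit (x + dx) dx rows) (pvLimit (y + dy) dy cols) =
      comb (pvLimit x dx rows) (pvLimit y dy cols) - 1 := by
  rcases h1' : pvLimit x dx rows with _ | t1 <;> rcases h2' : pvLimit y dy cols with _ | t2 <;>
      rw [h1', h2'] at h1
  · simp [comb] at h1
  · have hdx := (pvLimit_eq_none_iff _ _ _).1 h1'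
    simp only [comb] at h1
    rw [pvLimit_shift h2' h1,
      show pvLimit (x + dx) dx rows = none by rw [pvLimit_eq_none_iff]; exact hdx]
    simp [comb]
  · have hdy := (pvLimit_eq_none_iff _ _ _).1 h2'
    simp only [comb] at h1
    rw [pvLimit_shift h1' h1,
      show pvLimit (y + dy) dy cols = none by rw [pvLimit_eq_none_iff]; exact hdy]
    simp [comb]
  · simp only [comb, le_min_iff] at h1
    rw [pvLimit_shift h1' h1.1, pvLimit_shift h2' h1.2]
    simp only [comb]
    omega

theorem pvRay_cons {x y dx dy rows cols : Int}
    (hin : 0 ≤ x ∧ x < rows ∧ 0 ≤ y ∧ y < cols) (hd : ¬ (dx = 0 ∧ dy = 0)) :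
    pvRay x y dx dy rows cols = (x, y) :: pvRay (x + dx) (y + dy) dx dy rows cols := by
  obtain ⟨hx0, hx1, hy0, hy1⟩ := hin
  rw [pvRay_eq, pvRay_eq, if_pos ⟨hx0, hx1, hy0, hy1⟩]
  have hL0 : 0 ≤ comb (pvLimit x dx rows) (pvLimit y dy cols) :=
    comb_nonneg ⟨hx0, hx1⟩ ⟨hy0, hy1⟩
  have hiff := comb_next_iff hd ⟨hx0, hx1⟩ ⟨hy0, hy1⟩
  by_cases hge : 1 ≤ comb (pvLimit x dx rows) (pvLimit y dy cols)
  · rw [if_pos (hiff.2 hge), comb_shift ⟨hx0, hx1⟩ ⟨hy0, hy1⟩ hge]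
    generalize comb (pvLimit x dx rows) (pvLimit y dy cols) = L at hL0 hge
    rw [PySem.List.pyRange_one, PySem.List.pyRange_one]
    have ht : (L + 1 - 0).toNat = (L - 1 + 1 - 0).toNat + 1 := by omega
    rw [ht, List.range_succ_eq_map]
    simp only [List.map_cons, List.map_map]
    congr 1
    · simp
    · apply List.map_congr_left
      intro k _
      simp only [Function.comp_apply, Prod.mk.injEq]
      refine ⟨by push_cast; ring, by push_cast; ring⟩
  · have hL0' : comb (pvLimit x dx rows) (pvLimit y dy cols) = 0 := by omega
    rw [if_neg (fun hnext => hge (hiff.1 hnext)), hL0', PySem.List.pyRange_one]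
    norm_num [List.range_succ]

theorem pvRay_len {x y dx dy rows cols : Int} (hd : ¬ (dx = 0 ∧ dy = 0)) :
    (pvRay x y dx dy rows cols).length ≤ rows.toNat + cols.toNat + 1 := by
  rw [pvRay_eq]
  split_ifs with hin
  · obtain ⟨hx0, hx1, hy0, hy1⟩ := hin
    have hb : comb (pvLimit x dx rows) (pvLimit y dy cols) ≤ rows - 1 ∨
        comb (pvLimit x dx rows) (pvLimit y dy cols) ≤ cols - 1 := by
      cases h1 : pvLimit x dx rows <;> cases h2 : pvLimit y dy cols <;> simp only [comb]
      · exact absurd ⟨(pvLimit_eq_none_iff _ _ _).1 h1, (pvLimit_eq_none_iff _ _ _).1 h2⟩ hd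
      · exact Or.inr (pvLimit_le hy0 hy1 h2)
      · exact Or.inl (pvLimit_le hx0 hx1 h1)
      · exact Or.inl (le_trans (min_le_left _ _) (pvLimit_le hx0 hx1 h1))
    rw [List.length_map, PySem.List.length_pyRange_one]
    omega
  · simp

theorem pvRay_nil {x y dx dy rows cols : Int}
    (hout : ¬ (0 ≤ x ∧ x < rows ∧ 0 ≤ y ∧ y < cols)) :
    pvRay x y dx dy rows cols = [] := by
  rw [pvRay_eq, if_neg hout]

-- walk = Set.update over the closed-form ray ----------------------------
theorem pvWalkA_eq_update_aux {rows cols dx dy : Int} (hd : ¬ (dx = 0 ∧ dy = 0)) :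
    ∀ (fuel : Nat) (x y : Int) (s : PySem.Set (Int × Int)),
      (pvRay x y dx dy rows cols).length ≤ fuel →
      pvWalkA rows cols dx dy fuel x y s = PySem.Set.update s (pvRay x y dx dy rows cols) := by
  intro fuel
  induction fuel with
  | zero =>
    intro x y s hlen
    have hnil : pvRay x y dx dy rows cols = [] := by
      cases h : pvRay x y dx dy rows cols with
      | nil => rfl
      | cons a l => rw [h] at hlen; simp at hlen
    rw [hnil, pvWalkA]
    rfl
  | succ f ih =>
    intro x y s hlen
    rw [pvWalkA]
    by_cases hin : 0 ≤ x ∧ x < rows ∧ 0 ≤ y ∧ y < cols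
    · rw [if_pos hin]
      rw [pvRay_cons hin hd] at hlen ⊢
      simp only [List.length_cons] at hlen
      rw [ih _ _ _ (by omega)]
      rfl
    · rw [if_neg hin, pvRay_nil hin]
      rfl

theorem pvWalkA_eq_update {rows cols dx dy : Int} (hd : ¬ (dx = 0 ∧ dy = 0)) (x y : Int) (s : PySem.Set (Int × Int)) :
    pvWalkA rows cols dx dy (rows.toNat + cols.toNat + 1) x y s = PySem.Set.update s (pvRay x y dx dy rows cols) := by
  exact pvWalkA_eq_update_aux hd _ x y s (pvRay_len hd)

-- pair-loop normalization ----------------------------------------------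
theorem lemA_inner {α β : Type} (G2 : β → α → β) (i : Int) :
    ∀ (xs : List α) (s : Int) (acc : β),
      (PySem.List.enumerate xs s).foldl (fun a jp => if i ≥ jp.1 then a else G2 a jp.2) acc
        = (xs.drop (i + 1 - s).toNat).foldl G2 acc := by
  intro xs
  induction xs with
  | nil => intro s acc; simp [PySem.List.enumerate]
  | cons x xs ih =>
    intro s acc
    rw [PySem.List.enumerate_cons, List.foldl_cons]
    by_cases hsi : i ≥ s
    · rw [if_pos hsi, ih (s + 1)]
      have hh : (i + 1 - s).toNat = (i + 1 - (s + 1)).toNat + 1 := by omega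
      rw [hh, List.drop_succ_cons]
    · rw [if_neg hsi, ih (s + 1)]
      have h1 : (i + 1 - s).toNat = 0 := by omega
      have h2 : (i + 1 - (s + 1)).toNat = 0 := by omega
      rw [h1, h2]
      simp

theorem lemA_aux {α β : Type} (G : β → α → α → β) (ps : List α) :
    ∀ (tl : List α) (k : Nat), ps.drop k = tl → ∀ acc,
      (PySem.List.enumerate tl (k : Int)).foldl (fun a ip =>
        (ps.drop (ip.1 + 1).toNat).foldl (fun a q => G a ip.2 q) a) acc
      = foldPairs G tl acc := by
  intro tl
  induction tl with
  | nil => intro k h acc; simp [PySem.List.enumerate, foldPairs]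
  | cons x rest ih =>
    intro k h acc
    rw [PySem.List.enumerate_cons, List.foldl_cons]
    have hdrop : ps.drop (k + 1) = rest := by
      have h2 : (ps.drop k).tail = ps.drop (k + 1) := List.tail_drop
      rw [h] at h2
      simpa using h2.symm
    have hcast : (((k : Int)) + 1).toNat = k + 1 := by omega
    simp only [hcast, hdrop]
    rw [foldPairs]
    have hstart : ((k : Int)) + 1 = ((k + 1 : Nat) : Int) := by push_cast; ring
    rw [hstart]
    exact ih (k + 1) hdrop _

theorem lemA {α β : Type} (G : β → α → α → β) (ps : List α) (acc : β) :
    (PySem.List.enumerate ps).foldl (fun a ip =>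
      (PySem.List.enumerate ps).foldl (fun a jp => if ip.1 ≥ jp.1 then a else G a ip.2 jp.2) a) acc
      = foldPairs G ps acc := by
  have hstep : (PySem.List.enumerate ps).foldl (fun a ip =>
      (PySem.List.enumerate ps).foldl (fun a jp => if ip.1 ≥ jp.1 then a else G a ip.2 jp.2) a) acc
      = (PySem.List.enumerate ps).foldl (fun a ip =>
      (ps.drop (ip.1 + 1).toNat).foldl (fun a q => G a ip.2 q) a) acc := by
    apply PySem.List.foldl_congr_mem
    intro a ip _
    have := lemA_inner (fun a q => G a ip.2 q) ip.1 ps 0 a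
    simpa using this
  rw [hstep]
  exact lemA_aux G ps ps 0 (by simp) acc

theorem lemB_aux {β : Type} (G : β → (Int × Int) → (Int × Int) → β) (ps : List (Int × Int)) :
    ∀ (m k : Nat), ps.length - k = m → ∀ acc,
      (PySem.List.pyRange (k : Int) ((ps.length : Int) - 1) 1).foldl (fun a i =>
        (PySem.List.slice ps (some (i + 1)) none).foldl (fun a q => G a (PySem.List.pyGetD ps i (0, 0)) q) a) acc
      = foldPairs G (ps.drop k) acc := by
  intro m
  induction m with
  | zero =>
    intro k h acc
    rw [PySem.List.pyRange_one_eq_nil (by omega), List.drop_of_length_le (by omega)]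
    rfl
  | succ m ih =>
    intro k h acc
    have hk : k < ps.length := by omega
    have hget : PySem.List.pyGetD ps ((k : Nat) : Int) (0, 0) = ps[k] := by
      rw [PySem.List.pyGetD_eq_getElem ps (0, 0) (by omega) (by push_cast; omega)]
      simp
    have hdropk : ps.drop k = ps[k] :: ps.drop (k + 1) := List.drop_eq_getElem_cons hk
    by_cases hlast : k + 1 = ps.length
    · rw [PySem.List.pyRange_one_eq_nil (by omega)]
      have hnil : ps.drop (k + 1) = [] := List.drop_of_length_le (by omega)
      rw [hdropk, hnil]
      rfl
    · rw [PySem.List.pyRange_one_cons (by omega), List.foldl_cons]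
      have hslice : PySem.List.slice ps (some ((k : Int) + 1)) none = ps.drop (k + 1) := by
        rw [show ((k : Int) + 1) = ((k + 1 : Nat) : Int) by push_cast; ring,
          PySem.List.slice_from_natCast]
      rw [hslice, hget, hdropk, foldPairs]
      have hstart : ((k : Int)) + 1 = ((k + 1 : Nat) : Int) := by push_cast; ring
      rw [hstart]
      exact ih (k + 1) (by omega) _

theorem lemB {β : Type} (G : β → (Int × Int) → (Int × Int) → β) (ps : List (Int × Int)) (acc : β) :
    (PySem.List.pyRange 0 ((ps.length : Int) - 1) 1).foldl (fun a i =>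
      (PySem.List.slice ps (some (i + 1)) none).foldl (fun a q => G a (PySem.List.pyGetD ps i (0, 0)) q) a) acc
      = foldPairs G ps acc := by
  have := lemB_aux G ps ps.length 0 (by omega) acc
  simpa using this

theorem foldPairs_congr {α β : Type} (G1 G2 : β → α → α → β) :
    ∀ (xs : List α), xs.Nodup →
      (∀ p q a, p ∈ xs → q ∈ xs → p ≠ q → G1 a p q = G2 a p q) →
      ∀ acc, foldPairs G1 xs acc = foldPairs G2 xs acc := by
  intro xs
  induction xs with
  | nil => intro _ _ _; rfl
  | cons x rest ih =>
    intro hnd h acc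
    rw [foldPairs, foldPairs]
    have hinner : rest.foldl (fun a q => G1 a x q) acc = rest.foldl (fun a q => G2 a x q) acc := by
      apply PySem.List.foldl_congr_mem
      intro a q hq
      exact h x q a (List.mem_cons_self) (List.mem_cons_of_mem _ hq)
        (fun he => (List.nodup_cons.1 hnd).1 (he ▸ hq))
    rw [hinner]
    exact ih (List.nodup_cons.1 hnd).2
      (fun p q a hp hq hne => h p q a (List.mem_cons_of_mem _ hp) (List.mem_cons_of_mem _ hq) hne) _

-- the two per-pair actions, named (defeq to the loop bodies of the two ports)
def GA (rows cols : Int) (a : PySem.Set (Int × Int)) (u v : Int × Int) : PySem.Set (Int × Int) :=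
  let dx := v.1 - u.1
  let dy := v.2 - u.2
  let g : Int := if dy = 0 then |dx| else if dx = 0 then |dy| else |gcd_recursive dx dy|
  let dx := PySem.Int.floordiv dx g
  let dy := PySem.Int.floordiv dy g
  pvWalkA rows cols dx dy (rows.toNat + cols.toNat + 1) v.1 v.2
    (pvWalkA rows cols (-dx) (-dy) (rows.toNat + cols.toNat + 1) u.1 u.2 a)

def GB (rows cols : Int) (a : PySem.Set (Int × Int)) (u v : Int × Int) : PySem.Set (Int × Int) :=
  let g : Int := (pvGcdB (v.1 - u.1).natAbs (v.2 - u.2).natAbs : Nat)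
  let dx := PySem.Int.floordiv (v.1 - u.1) g
  let dy := PySem.Int.floordiv (v.2 - u.2) g
  PySem.Set.update (PySem.Set.update a (pvRay u.1 u.2 (-dx) (-dy) rows cols))
    (pvRay v.1 v.2 dx dy rows cols)

-- the two per-pair actions agree on distinct points ---------------------
theorem pair_action_eq (rows cols : Int) (p q : Int × Int) (hne : p ≠ q) (a : PySem.Set (Int × Int)) :
    GA rows cols a p q = GB rows cols a p q := by
  unfold GA GB
  have hne' : ¬ (q.1 - p.1 = 0 ∧ q.2 - p.2 = 0) := by
    rintro ⟨h1, h2⟩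
    exact hne (Prod.ext (by omega) (by omega)).symm
  have hg := gcdA_eq_gcdB (q.1 - p.1) (q.2 - p.2)
  have hgpos : 0 < ((pvGcdB (q.1 - p.1).natAbs (q.2 - p.2).natAbs : Nat) : Int) := by
    rw [pvGcdB_eq_gcd]
    have hnz : Nat.gcd (q.1 - p.1).natAbs (q.2 - p.2).natAbs ≠ 0 := by
      intro h0
      rw [Nat.gcd_eq_zero_iff] at h0
      exact hne' ⟨Int.natAbs_eq_zero.1 h0.1, Int.natAbs_eq_zero.1 h0.2⟩
    omega
  have hdvdx : ((pvGcdB (q.1 - p.1).natAbs (q.2 - p.2).natAbs : Nat) : Int) ∣ (q.1 - p.1) := by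
    rw [pvGcdB_eq_gcd]; exact Int.gcd_dvd_left (q.1 - p.1) (q.2 - p.2)
  have hdvdy : ((pvGcdB (q.1 - p.1).natAbs (q.2 - p.2).natAbs : Nat) : Int) ∣ (q.2 - p.2) := by
    rw [pvGcdB_eq_gcd]; exact Int.gcd_dvd_right (q.1 - p.1) (q.2 - p.2)
  have hd' : ¬ (PySem.Int.floordiv (q.1 - p.1) ((pvGcdB (q.1 - p.1).natAbs (q.2 - p.2).natAbs : Nat) : Int) = 0 ∧
      PySem.Int.floordiv (q.2 - p.2) ((pvGcdB (q.1 - p.1).natAbs (q.2 - p.2).natAbs : Nat) : Int) = 0) := by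
    rw [PySem.Int.floordiv_eq_ediv_of_pos hgpos, PySem.Int.floordiv_eq_ediv_of_pos hgpos]
    rintro ⟨h1, h2⟩
    apply hne'
    constructor
    · have := Int.ediv_mul_cancel hdvdx
      rw [h1] at this
      omega
    · have := Int.ediv_mul_cancel hdvdy
      rw [h2] at this
      omega
  have hd'' : ¬ (-(PySem.Int.floordiv (q.1 - p.1) ((pvGcdB (q.1 - p.1).natAbs (q.2 - p.2).natAbs : Nat) : Int)) = 0 ∧
      -(PySem.Int.floordiv (q.2 - p.2) ((pvGcdB (q.1 - p.1).natAbs (q.2 - p.2).natAbs : Nat) : Int)) = 0) := by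
    rintro ⟨h1, h2⟩
    exact hd' ⟨by omega, by omega⟩
  simp only [hg]
  rw [pvWalkA_eq_update hd'', pvWalkA_eq_update hd']

-- per-frequency bodies of the two ports agree on a duplicate-free position list
theorem perfreq (rows cols : Int) (ps : List (Int × Int)) (hnd : ps.Nodup) (acc : PySem.Set (Int × Int)) :
    (if ps.length < 2 then acc
     else (PySem.List.enumerate ps).foldl (fun a ip =>
        (PySem.List.enumerate ps).foldl (fun a jp =>
          if ip.1 ≥ jp.1 then a else GA rows cols a ip.2 jp.2) a)
        (PySem.Set.update acc ps))
    = (if ps.length < 2 then acc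
       else (PySem.List.pyRange 0 ((ps.length : Int) - 1) 1).foldl (fun a i =>
          (PySem.List.slice ps (some (i + 1)) none).foldl (fun a q =>
            GB rows cols a (PySem.List.pyGetD ps i (0, 0)) q) a)
          (PySem.Set.update acc ps)) := by
  by_cases hlen : ps.length < 2
  · rw [if_pos hlen, if_pos hlen]
  · rw [if_neg hlen, if_neg hlen, lemA, lemB]
    exact foldPairs_congr _ _ ps hnd
      (fun p q a _ _ hne => pair_action_eq rows cols p q hne a) _

-- ===== VERDICT (by name: the statement is the Claim_ definition above) =====
theorem calculate_antinodes_with_harmonics_spec : Claim_equal_calculate_antinodes_with_harmonics := by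
  intro antennas_by_freq rows cols _ hpre
  unfold Spec_calculate_antinodes_with_harmonics
  unfold calculate_antinodes_with_harmonics calculate_antinodes_with_harmonics_alt
  apply PySem.List.foldl_congr_mem
  intro acc fp hfp
  have hnd : fp.2.Nodup := hpre fp hfp
  exact perfreq rows cols fp.2 hnd acc
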